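-- pv_equiv track=rewrite | github.com/Ritik-JS/Alumini | backend/ml/llm_advisor.py | _prioritize_skills
-- ===== SOURCE A (Python) =====
-- from typing import Dict, List, Optional
--
-- def _prioritize_skills(skills: List[str], target_role: str) -> List[str]:
--     """
--     Prioritize skills based on role requirements (simplified rule-based)
--     """
--     # Define skill importance by category
--     high_priority = ['leadership', 'management', 'architecture', 'strategy']
--     medium_priority = ['communication', 'collaboration', 'problem solving']
--
--     high = []
--     medium = []
--     other = []
--
--     for skill in skills:
--         skill_lower = skill.lower()
--         if any(hp in skill_lower for hp in high_priority):
--             high.append(skill)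
--         elif any(mp in skill_lower for mp in medium_priority):
--             medium.append(skill)
--         else:
--             other.append(skill)
--
--     return high + medium + other
-- ===== SOURCE B (Python) =====
-- from typing import Dict, List, Optional
--
-- def _prioritize_skills(skills: List[str], target_role: str) -> List[str]:
--     """Prioritize skills by rank via a single stable sort."""
--     high_priority = ['leadership', 'management', 'architecture', 'strategy']
--     medium_priority = ['communication', 'collaboration', 'problem solving']
--
--     def rank(skill: str) -> int:
--         s = skill.lower()
--         if any(hp in s for hp in high_priority):
--             return 0
--         if any(mp in s for mp in medium_priority):
--             return 1
--         return 2
--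
--     return sorted(skills, key=rank)
-- ===== Notes on version B (the rewrite author's own statement) =====
-- stated objective: idiomatic
-- what changed: Replaces the three-accumulator partition loop with a rank key function and one stable sort (sorted(skills, key=rank)), relying on sort stability to preserve relative order within each tier.
import Mathlib
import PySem

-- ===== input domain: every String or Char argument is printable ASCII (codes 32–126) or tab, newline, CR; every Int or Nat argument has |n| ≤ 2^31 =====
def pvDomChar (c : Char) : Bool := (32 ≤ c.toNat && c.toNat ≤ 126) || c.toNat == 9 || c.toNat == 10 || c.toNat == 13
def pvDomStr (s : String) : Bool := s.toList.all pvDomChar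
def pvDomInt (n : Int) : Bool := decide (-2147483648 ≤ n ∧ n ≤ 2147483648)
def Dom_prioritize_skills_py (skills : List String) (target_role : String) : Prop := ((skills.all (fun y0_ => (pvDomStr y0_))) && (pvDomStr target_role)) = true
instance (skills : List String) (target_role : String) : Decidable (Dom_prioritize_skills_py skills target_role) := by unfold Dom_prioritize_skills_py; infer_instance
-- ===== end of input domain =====

-- B replaces A's three-accumulator partition loop by one stable sort with a rank key (idiomatic; same matching rules).

-- ===== PORT A =====
-- the two keyword constant lists (same in both versions)
def pvHigh : List String := ["leadership", "management", "architecture", "strategy"]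
def pvMed : List String := ["communication", "collaboration", "problem solving"]

def prioritize_skills_py (skills : List String) (target_role : String) : List String :=
  let st := skills.foldl
    (fun (acc : List String × List String × List String) skill =>
      let skill_lower := PySem.Str.lower skill
      if pvHigh.any (fun hp => PySem.Str.isIn hp skill_lower) then
        (acc.1 ++ [skill], acc.2.1, acc.2.2)
      else if pvMed.any (fun mp => PySem.Str.isIn mp skill_lower) then
        (acc.1, acc.2.1 ++ [skill], acc.2.2)
      else
        (acc.1, acc.2.1, acc.2.2 ++ [skill]))
    ([], [], [])
  st.1 ++ st.2.1 ++ st.2.2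

-- ===== PORT B =====
def pvRank (skill : String) : Int :=
  let s := PySem.Str.lower skill
  if pvHigh.any (fun hp => PySem.Str.isIn hp s) then 0
  else if pvMed.any (fun mp => PySem.Str.isIn mp s) then 1
  else 2

def prioritize_skills_py_alt (skills : List String) (target_role : String) : List String :=
  PySem.List.sorted skills pvRank false

-- ===== PRECONDITION & SPEC =====
def Spec_prioritize_skills_py (skills : List String) (target_role : String) (out : List String) : Prop := out = prioritize_skills_py_alt skills target_role
instance (skills : List String) (target_role : String) (out : List String) : Decidable (Spec_prioritize_skills_py skills target_role out) := by unfold Spec_prioritize_skills_py; infer_instance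

-- ===== CLAIM (what is proved, stated in full; the proofs are below) =====
def Claim_equal_prioritize_skills_py : Prop := ∀ (skills : List String) (target_role : String), Dom_prioritize_skills_py skills target_role → Spec_prioritize_skills_py skills target_role (prioritize_skills_py skills target_role)

-- ===== LEMMAS AND PROOFS =====

theorem pvRank_cases (x : String) : pvRank x = 0 ∨ pvRank x = 1 ∨ pvRank x = 2 := by
  simp only [pvRank]; split_ifs <;> simp

theorem insertBy_of_forall_before {α : Type} (before : α → α → Bool) (x : α) (ys : List α)
    (h : ∀ y ∈ ys, before x y = true) : PySem.List.insertBy before x ys = x :: ys := by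
  cases ys with
  | nil => rfl
  | cons y t => simp [PySem.List.insertBy, h y (by simp)]

theorem insertBy_append_of_forall_not_before {α : Type} (before : α → α → Bool) (x : α)
    (as bs : List α) (h : ∀ y ∈ as, before x y = false) :
    PySem.List.insertBy before x (as ++ bs) = as ++ PySem.List.insertBy before x bs := by
  induction as with
  | nil => rfl
  | cons a t ih =>
      simp only [List.cons_append, PySem.List.insertBy, h a (by simp)]
      simp only [Bool.false_eq_true, if_false]
      rw [ih (fun y hy => h y (by simp [hy]))]

-- inserting x into a bucketed list appends it to the end of its rank bucket
theorem ins_bucket (a0 a1 a2 : List String) (x : String)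
    (h0 : ∀ y ∈ a0, pvRank y = 0) (h1 : ∀ y ∈ a1, pvRank y = 1) (h2 : ∀ y ∈ a2, pvRank y = 2) :
    PySem.List.insertBy (fun a b => decide (pvRank a < pvRank b)) x (a0 ++ a1 ++ a2) =
      if pvRank x = 0 then (a0 ++ [x]) ++ a1 ++ a2
      else if pvRank x = 1 then a0 ++ (a1 ++ [x]) ++ a2
      else a0 ++ a1 ++ (a2 ++ [x]) := by
  rcases pvRank_cases x with hr | hr | hr <;> rw [hr] <;> simp only [List.append_assoc]
  · rw [insertBy_append_of_forall_not_before _ _ _ _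
        (fun y hy => by simp [h0 y hy, hr])]
    rw [insertBy_of_forall_before _ _ _
        (fun y hy => by
          rcases List.mem_append.mp hy with hy | hy
          · simp [h1 y hy, hr]
          · simp [h2 y hy, hr])]
    simp
  · rw [insertBy_append_of_forall_not_before _ _ _ _
        (fun y hy => by simp [h0 y hy, hr])]
    rw [insertBy_append_of_forall_not_before _ _ _ _
        (fun y hy => by simp [h1 y hy, hr])]
    rw [insertBy_of_forall_before _ _ _
        (fun y hy => by simp [h2 y hy, hr])]
    simp
  · rw [show a0 ++ (a1 ++ a2) = (a0 ++ a1 ++ a2) ++ [] by simp]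
    rw [PySem.List.insertBy_of_forall_not_before _ _ _
        (fun y hy => by
          simp only [List.append_nil, List.mem_append] at hy
          rcases hy with (hy | hy) | hy
          · simp [h0 y hy, hr]
          · simp [h1 y hy, hr]
          · simp [h2 y hy, hr])]
    simp

-- the stable insertion sort keeps the three rank buckets in order
theorem foldl_ins_buckets (xs : List String) : ∀ (a0 a1 a2 : List String),
    (∀ y ∈ a0, pvRank y = 0) → (∀ y ∈ a1, pvRank y = 1) → (∀ y ∈ a2, pvRank y = 2) →
    xs.foldl (fun acc x => PySem.List.insertBy (fun a b => decide (pvRank a < pvRank b)) x acc)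
      (a0 ++ a1 ++ a2) =
    (a0 ++ xs.filter (fun x => pvRank x = 0)) ++ (a1 ++ xs.filter (fun x => pvRank x = 1))
      ++ (a2 ++ xs.filter (fun x => pvRank x = 2)) := by
  induction xs with
  | nil => intro a0 a1 a2 _ _ _; simp
  | cons x t ih =>
      intro a0 a1 a2 h0 h1 h2
      simp only [List.foldl_cons]
      rw [ins_bucket a0 a1 a2 x h0 h1 h2]
      rcases pvRank_cases x with hr | hr | hr
      · rw [if_pos hr,
          ih (a0 ++ [x]) a1 a2
            (by intro y hy; rcases List.mem_append.mp hy with hy | hy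
                · exact h0 y hy
                · simp at hy; subst hy; exact hr)
            h1 h2]
        simp [hr]
      · rw [if_neg (by omega), if_pos hr,
          ih a0 (a1 ++ [x]) a2 h0
            (by intro y hy; rcases List.mem_append.mp hy with hy | hy
                · exact h1 y hy
                · simp at hy; subst hy; exact hr)
            h2]
        simp [hr]
      · rw [if_neg (by omega), if_neg (by omega),
          ih a0 a1 (a2 ++ [x]) h0 h1
            (by intro y hy; rcases List.mem_append.mp hy with hy | hy
                · exact h2 y hy
                · simp at hy; subst hy; exact hr)]
        simp [hr]

theorem alt_eq_filters (skills : List String) (target_role : String) :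
    prioritize_skills_py_alt skills target_role =
      skills.filter (fun x => pvRank x = 0) ++ skills.filter (fun x => pvRank x = 1)
        ++ skills.filter (fun x => pvRank x = 2) := by
  unfold prioritize_skills_py_alt
  rw [PySem.List.sorted_eq_foldl_insertBy]
  have := foldl_ins_buckets skills [] [] [] (by simp) (by simp) (by simp)
  simpa using this

-- A's loop state after processing xs, from an arbitrary starting state
theorem a_foldl_state (xs : List String) : ∀ (h m o : List String),
    xs.foldl
      (fun (acc : List String × List String × List String) skill =>
        let skill_lower := PySem.Str.lower skill
        if pvHigh.any (fun hp => PySem.Str.isIn hp skill_lower) then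
          (acc.1 ++ [skill], acc.2.1, acc.2.2)
        else if pvMed.any (fun mp => PySem.Str.isIn mp skill_lower) then
          (acc.1, acc.2.1 ++ [skill], acc.2.2)
        else
          (acc.1, acc.2.1, acc.2.2 ++ [skill]))
      (h, m, o) =
    (h ++ xs.filter (fun x => pvRank x = 0), m ++ xs.filter (fun x => pvRank x = 1),
      o ++ xs.filter (fun x => pvRank x = 2)) := by
  induction xs with
  | nil => intro h m o; simp
  | cons x t ih =>
      intro h m o
      simp only [List.foldl_cons]
      by_cases hH : pvHigh.any (fun hp => PySem.Str.isIn hp (PySem.Str.lower x)) = true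
      · have hr : pvRank x = 0 := by simp only [pvRank]; rw [if_pos hH]
        simp only [hH, if_true]
        rw [ih]
        simp [hr]
      · by_cases hM : pvMed.any (fun mp => PySem.Str.isIn mp (PySem.Str.lower x)) = true
        · have hr : pvRank x = 1 := by simp only [pvRank]; rw [if_neg hH, if_pos hM]
          simp only [hH, hM, Bool.false_eq_true, if_false, if_true]
          rw [ih]
          simp [hr]
        · have hr : pvRank x = 2 := by simp only [pvRank]; rw [if_neg hH, if_neg hM]
          simp only [hH, hM, Bool.false_eq_true, if_false]
          rw [ih]
          simp [hr]

-- ===== VERDICT (by name: the statement is the Claim_ definition above) =====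
theorem prioritize_skills_py_spec : Claim_equal_prioritize_skills_py := by
  intro skills target_role _
  unfold Spec_prioritize_skills_py
  rw [alt_eq_filters]
  unfold prioritize_skills_py
  rw [a_foldl_state skills [] [] []]
  simp
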